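-- pv_equiv track=rewrite | github.com/edusancheez2005/whale-transaction-monitor | address_enrichment.py | _map_nansen_label_to_type
-- ===== SOURCE A (Python) =====
-- from enum import Enum
--
-- class AddressLabelType(str, Enum):
--     """Types of address labels"""
--     EXCHANGE = "exchange"  # Centralized exchanges
--     DEX = "dex"  # Decentralized exchanges
--     BRIDGE = "bridge"  # Cross-chain bridges
--     MARKET_MAKER = "market_maker"  # Market makers, liquidity providers
--     LENDING_PROTOCOL = "lending_protocol"  # Lending/borrowing platforms
--     VALIDATOR = "validator"  # Blockchain validators
--     SCAMMER = "scammer"  # Known scam addresses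
--     MEV_BOT = "mev_bot"  # MEV bots and extractors
--     CONTRACT = "contract"  # Smart contracts
--     PERSONAL = "personal"  # Individual wallets
--     WHALE = "whale"  # Large holders
--     UNKNOWN = "unknown"  # Unknown or unclassified
--
-- def _map_nansen_label_to_type(nansen_label: str) -> AddressLabelType:
--     """Map Nansen's label to our label type"""
--     nansen_label = nansen_label.lower()
--
--     if any(term in nansen_label for term in ["exchange", "cex"]):
--         return AddressLabelType.EXCHANGE
--     elif any(term in nansen_label for term in ["dex", "uniswap", "sushiswap", "pancakeswap"]):
--         return AddressLabelType.DEX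
--     elif any(term in nansen_label for term in ["bridge", "portal", "wormhole"]):
--         return AddressLabelType.BRIDGE
--     elif any(term in nansen_label for term in ["market maker", "mm", "liquidity provider"]):
--         return AddressLabelType.MARKET_MAKER
--     elif any(term in nansen_label for term in ["aave", "compound", "lending", "lend"]):
--         return AddressLabelType.LENDING_PROTOCOL
--     elif any(term in nansen_label for term in ["validator", "staking"]):
--         return AddressLabelType.VALIDATOR
--     elif any(term in nansen_label for term in ["scam", "phish", "hack"]):
--         return AddressLabelType.SCAMMER
--     elif any(term in nansen_label for term in ["mev", "frontrun", "arbitrage bot"]):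
--         return AddressLabelType.MEV_BOT
--     elif any(term in nansen_label for term in ["contract", "token", "erc20", "erc721"]):
--         return AddressLabelType.CONTRACT
--     elif any(term in nansen_label for term in ["whale", "large holder"]):
--         return AddressLabelType.WHALE
--     elif any(term in nansen_label for term in ["individual", "personal", "user", "wallet"]):
--         return AddressLabelType.PERSONAL
--     else:
--         return AddressLabelType.UNKNOWN
-- ===== SOURCE B (Python) =====
-- from enum import Enum
--
-- class AddressLabelType(str, Enum):
--     EXCHANGE = "exchange"
--     DEX = "dex"
--     BRIDGE = "bridge"
--     MARKET_MAKER = "market_maker"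
--     LENDING_PROTOCOL = "lending_protocol"
--     VALIDATOR = "validator"
--     SCAMMER = "scammer"
--     MEV_BOT = "mev_bot"
--     CONTRACT = "contract"
--     PERSONAL = "personal"
--     WHALE = "whale"
--     UNKNOWN = "unknown"
--
-- # Priority order (highest first), as in the original cascade.
-- _RULES = [
--     (AddressLabelType.EXCHANGE, ["exchange", "cex"]),
--     (AddressLabelType.DEX, ["dex", "uniswap", "sushiswap", "pancakeswap"]),
--     (AddressLabelType.BRIDGE, ["bridge", "portal", "wormhole"]),
--     (AddressLabelType.MARKET_MAKER, ["market maker", "mm", "liquidity provider"]),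
--     (AddressLabelType.LENDING_PROTOCOL, ["aave", "compound", "lending", "lend"]),
--     (AddressLabelType.VALIDATOR, ["validator", "staking"]),
--     (AddressLabelType.SCAMMER, ["scam", "phish", "hack"]),
--     (AddressLabelType.MEV_BOT, ["mev", "frontrun", "arbitrage bot"]),
--     (AddressLabelType.CONTRACT, ["contract", "token", "erc20", "erc721"]),
--     (AddressLabelType.WHALE, ["whale", "large holder"]),
--     (AddressLabelType.PERSONAL, ["individual", "personal", "user", "wallet"]),
-- ]
--
-- def _map_nansen_label_to_type(nansen_label: str) -> AddressLabelType:
--     """Map Nansen's label to our label type.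
--
--     Last-write-wins strategy: walk the rules from LOWEST to HIGHEST priority
--     and overwrite the result on every matching term; after the full sweep the
--     result is the highest-priority matching category (UNKNOWN if none matched).
--     No first-match search and no early exit anywhere.
--     """
--     label = nansen_label.lower()
--     result = AddressLabelType.UNKNOWN
--     for label_type, terms in reversed(_RULES):
--         for term in terms:
--             if term in label:
--                 result = label_type
--     return result
-- ===== Notes on version B (the rewrite author's own statement) =====
-- stated objective: alternative
-- what changed: Replaced the first-match if-elif cascade with a last-write-wins sweep: iterate the rules from lowest to highest priority and overwrite the result on every matching term, so the final overwrite is the highest-priority match; no early exit or first-match search.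
import Mathlib
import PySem

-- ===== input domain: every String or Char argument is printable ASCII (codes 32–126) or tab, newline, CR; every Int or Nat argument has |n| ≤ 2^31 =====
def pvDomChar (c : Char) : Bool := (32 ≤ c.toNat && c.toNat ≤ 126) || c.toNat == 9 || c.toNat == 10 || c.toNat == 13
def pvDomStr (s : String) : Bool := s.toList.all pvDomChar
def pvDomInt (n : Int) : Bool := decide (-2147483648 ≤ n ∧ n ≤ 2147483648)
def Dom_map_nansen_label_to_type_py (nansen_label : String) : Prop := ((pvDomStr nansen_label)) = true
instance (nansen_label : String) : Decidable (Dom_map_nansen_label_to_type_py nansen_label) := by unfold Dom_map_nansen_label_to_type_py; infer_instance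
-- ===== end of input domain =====

-- B replaces A's first-match if-elif cascade by a last-write-wins sweep from lowest to highest
-- priority (alternative evaluation strategy, same asymptotic cost).

-- ===== PORT A =====
def map_nansen_label_to_type_py (nansen_label : String) : String :=
  let l := PySem.Str.lower nansen_label
  if ["exchange", "cex"].any (fun t => PySem.Str.isIn t l) then "exchange"
  else if ["dex", "uniswap", "sushiswap", "pancakeswap"].any (fun t => PySem.Str.isIn t l) then "dex"
  else if ["bridge", "portal", "wormhole"].any (fun t => PySem.Str.isIn t l) then "bridge"
  else if ["market maker", "mm", "liquidity provider"].any (fun t => PySem.Str.isIn t l) then "market_maker"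
  else if ["aave", "compound", "lending", "lend"].any (fun t => PySem.Str.isIn t l) then "lending_protocol"
  else if ["validator", "staking"].any (fun t => PySem.Str.isIn t l) then "validator"
  else if ["scam", "phish", "hack"].any (fun t => PySem.Str.isIn t l) then "scammer"
  else if ["mev", "frontrun", "arbitrage bot"].any (fun t => PySem.Str.isIn t l) then "mev_bot"
  else if ["contract", "token", "erc20", "erc721"].any (fun t => PySem.Str.isIn t l) then "contract"
  else if ["whale", "large holder"].any (fun t => PySem.Str.isIn t l) then "whale"
  else if ["individual", "personal", "user", "wallet"].any (fun t => PySem.Str.isIn t l) then "personal"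
  else "unknown"

-- ===== PORT B =====
-- Priority order (highest first), exactly the order of A's cascade.
def pvRules : List (String × List String) :=
  [("exchange", ["exchange", "cex"]),
   ("dex", ["dex", "uniswap", "sushiswap", "pancakeswap"]),
   ("bridge", ["bridge", "portal", "wormhole"]),
   ("market_maker", ["market maker", "mm", "liquidity provider"]),
   ("lending_protocol", ["aave", "compound", "lending", "lend"]),
   ("validator", ["validator", "staking"]),
   ("scammer", ["scam", "phish", "hack"]),
   ("mev_bot", ["mev", "frontrun", "arbitrage bot"]),
   ("contract", ["contract", "token", "erc20", "erc721"]),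
   ("whale", ["whale", "large holder"]),
   ("personal", ["individual", "personal", "user", "wallet"])]

-- Sweep the rules from lowest to highest priority, overwriting `result` on every matching term;
-- the final overwrite comes from the highest-priority matching group ("unknown" if none matched).
def map_nansen_label_to_type_py_alt (nansen_label : String) : String :=
  let label := PySem.Str.lower nansen_label
  pvRules.reverse.foldl
    (fun result rule =>
      rule.2.foldl (fun result term => if PySem.Str.isIn term label then rule.1 else result) result)
    "unknown"

-- ===== PRECONDITION & SPEC =====
def Spec_map_nansen_label_to_type_py (nansen_label : String) (out : String) : Prop := out = map_nansen_label_to_type_py_alt nansen_label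
instance (nansen_label : String) (out : String) : Decidable (Spec_map_nansen_label_to_type_py nansen_label out) := by unfold Spec_map_nansen_label_to_type_py; infer_instance

-- ===== CLAIM =====
def Claim_equal_map_nansen_label_to_type_py : Prop := ∀ (nansen_label : String), Dom_map_nansen_label_to_type_py nansen_label → Spec_map_nansen_label_to_type_py nansen_label (map_nansen_label_to_type_py nansen_label)

-- ===== LEMMAS AND PROOFS =====

-- Overwriting on every matching term of one group equals "if any term matches, take the group's
-- label, else keep the accumulator".
theorem pvInnerSweep (lab label : String) (ts : List String) (r : String) :
    ts.foldl (fun result term => if PySem.Str.isIn term label then lab else result) r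
      = if ts.any (fun t => PySem.Str.isIn t label) then lab else r := by
  induction ts generalizing r with
  | nil => rfl
  | cons t ts ih =>
      rw [List.foldl_cons, ih, List.any_cons]
      cases hp : PySem.Str.isIn t label <;>
        cases hq : ts.any (fun t => PySem.Str.isIn t label) <;> simp

-- ===== VERDICT =====
theorem map_nansen_label_to_type_py_spec : Claim_equal_map_nansen_label_to_type_py := by
  intro nansen_label _
  unfold Spec_map_nansen_label_to_type_py
  unfold map_nansen_label_to_type_py map_nansen_label_to_type_py_alt
  rw [List.foldl_reverse]
  simp only [pvRules, List.foldr_cons, List.foldr_nil, pvInnerSweep]
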